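-- pv_equiv track=rewrite | github.com/mhtruong1031/GeardUp | spikerbox/spikerbox.py | _strip_message_blocks
-- ===== SOURCE A (Python) =====
-- MSG_BLOCK_START = (0xFF, 0xFF, 0x01, 0x01, 0x80, 0xFF)
--
-- MSG_BLOCK_END = (0xFF, 0xFF, 0x01, 0x01, 0x81, 0xFF)
--
-- def _strip_message_blocks(data: list[int]) -> list[int]:
--     """
--     Remove message blocks (escape sequences) from the stream so 0xFF etc. are not
--     interpreted as frame starts. Returns only bytes that are sample data.
--     """
--     result: list[int] = []
--     n_start, n_end = len(MSG_BLOCK_START), len(MSG_BLOCK_END)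
--     i = 0
--     while i < len(data):
--         if i <= len(data) - n_start and tuple(data[i : i + n_start]) == MSG_BLOCK_START:
--             i += n_start
--             while i <= len(data) - n_end:
--                 if tuple(data[i : i + n_end]) == MSG_BLOCK_END:
--                     i += n_end
--                     break
--                 i += 1
--             else:
--                 i = len(data)
--         else:
--             result.append(data[i])
--             i += 1
--     return result
-- ===== SOURCE B (Python) =====
-- MSG_BLOCK_START = (0xFF, 0xFF, 0x01, 0x01, 0x80, 0xFF)
--
-- MSG_BLOCK_END = (0xFF, 0xFF, 0x01, 0x01, 0x81, 0xFF)
--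
-- def _strip_message_blocks(data: list[int]) -> list[int]:
--     """Two-phase version: locate the kept (start, end) gaps between message
--     blocks first, then assemble the output from slices of data."""
--     n = len(data)
--     spans: list[tuple[int, int]] = []   # kept regions
--     cursor = 0                          # start of current kept region
--     i = 0
--     while i <= n - 6:
--         if tuple(data[i:i + 6]) == MSG_BLOCK_START:
--             spans.append((cursor, i))
--             j = i + 6
--             while j <= n - 6 and tuple(data[j:j + 6]) != MSG_BLOCK_END:
--                 j += 1
--             i = j + 6 if j <= n - 6 else n
--             cursor = i
--         else:
--             i += 1
--     spans.append((cursor, n))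
--     out: list[int] = []
--     for a, b in spans:
--         out.extend(data[a:b])
--     return out
-- ===== Notes on version B (the rewrite author's own statement) =====
-- stated objective: alternative
-- what changed: A removes blocks in one byte-by-byte scan that appends each kept byte to the result; B first locates the kept (start,end) gaps between message blocks in a scan pass and then assembles the output by concatenating whole slices of the input.
import Mathlib
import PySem

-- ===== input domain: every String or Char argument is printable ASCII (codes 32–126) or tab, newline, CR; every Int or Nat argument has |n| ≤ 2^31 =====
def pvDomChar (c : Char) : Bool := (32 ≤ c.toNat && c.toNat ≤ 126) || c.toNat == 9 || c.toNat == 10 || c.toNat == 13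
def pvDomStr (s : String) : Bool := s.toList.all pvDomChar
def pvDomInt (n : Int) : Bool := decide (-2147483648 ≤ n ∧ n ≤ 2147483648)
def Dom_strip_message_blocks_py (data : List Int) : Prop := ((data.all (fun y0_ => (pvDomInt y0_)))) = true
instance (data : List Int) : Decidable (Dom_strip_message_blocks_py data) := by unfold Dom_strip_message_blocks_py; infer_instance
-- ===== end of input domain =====

-- B restructures A's single byte-by-byte scan into two phases (locate the kept
-- (start,end) gaps, then assemble the output from whole slices); objective: alternative.

-- ===== PORT A =====
def pvMsgStart : List Int := [0xFF, 0xFF, 0x01, 0x01, 0x80, 0xFF]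
def pvMsgEnd : List Int := [0xFF, 0xFF, 0x01, 0x01, 0x81, 0xFF]

-- A's inner `while … else` loop: returns the index after skipping to past the
-- end marker (or len(data) when none is found).
def pvAFind (data : List Int) (i : Nat) : Nat :=
  if h : (i : Int) ≤ (data.length : Int) - 6 then
    if PySem.List.slice data (some (i : Int)) (some ((i : Int) + 6)) = pvMsgEnd then i + 6
    else pvAFind data (i + 1)
  else data.length
termination_by data.length - i
decreasing_by omega

theorem pvAFind_ge (data : List Int) (i : Nat) (hle : i ≤ data.length) : i ≤ pvAFind data i := by
  fun_induction pvAFind data i <;> omega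

-- A's outer while loop, carrying `result`.
def pvALoop (data : List Int) (i : Nat) (result : List Int) : List Int :=
  if h : i < data.length then
    if hstart : (i : Int) ≤ (data.length : Int) - 6 ∧
        PySem.List.slice data (some (i : Int)) (some ((i : Int) + 6)) = pvMsgStart then
      pvALoop data (pvAFind data (i + 6)) result
    else
      pvALoop data (i + 1) (result ++ [(PySem.List.pyGet? data (i : Int)).getD 0])
  else result
termination_by data.length - i
decreasing_by
  · have := pvAFind_ge data (i + 6) (by omega); omega
  · omega

def strip_message_blocks_py (data : List Int) : List Int := pvALoop data 0 []

-- ===== PORT B =====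
-- B's inner find loop: first j ≥ start with j > n-6 or the end marker at j.
def pvBFind (data : List Int) (j : Nat) : Nat :=
  if h : (j : Int) ≤ (data.length : Int) - 6 then
    if PySem.List.slice data (some (j : Int)) (some ((j : Int) + 6)) ≠ pvMsgEnd then
      pvBFind data (j + 1)
    else j
  else j
termination_by data.length - j
decreasing_by omega

theorem pvBFind_ge (data : List Int) (j : Nat) : j ≤ pvBFind data j := by
  fun_induction pvBFind data j <;> omega

-- B's first phase: collect the kept (start, end) gaps.
def pvBScan (data : List Int) (i cursor : Nat) (spans : List (Nat × Nat)) : List (Nat × Nat) :=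
  if h : (i : Int) ≤ (data.length : Int) - 6 then
    if PySem.List.slice data (some (i : Int)) (some ((i : Int) + 6)) = pvMsgStart then
      let j := pvBFind data (i + 6)
      let i' := if (j : Int) ≤ (data.length : Int) - 6 then j + 6 else data.length
      pvBScan data i' i' (spans ++ [(cursor, i)])
    else pvBScan data (i + 1) cursor spans
  else spans ++ [(cursor, data.length)]
termination_by data.length - i
decreasing_by
  · have := pvBFind_ge data (i + 6); split <;> omega
  · omega

-- B's second phase: concatenate the kept slices.
def strip_message_blocks_py_alt (data : List Int) : List Int :=
  (pvBScan data 0 0 []).foldl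
    (fun acc p => acc ++ PySem.List.slice data (some ((p.1 : Nat) : Int)) (some ((p.2 : Nat) : Int))) []

-- ===== PRECONDITION & SPEC =====
def Spec_strip_message_blocks_py (data : List Int) (out : List Int) : Prop := out = strip_message_blocks_py_alt data
instance (data : List Int) (out : List Int) : Decidable (Spec_strip_message_blocks_py data out) := by unfold Spec_strip_message_blocks_py; infer_instance

-- ===== CLAIM (what is proved, stated in full; the proofs are below) =====
def Claim_equal_strip_message_blocks_py : Prop := ∀ (data : List Int), Dom_strip_message_blocks_py data → Spec_strip_message_blocks_py data (strip_message_blocks_py data)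

-- ===== LEMMAS AND PROOFS =====

-- A's inner loop computes exactly what B's find + post-check compute.
theorem pvAFind_eq (k : Nat) (data : List Int) (j : Nat) (hk : data.length - j ≤ k) :
    pvAFind data j =
      if ((pvBFind data j : Nat) : Int) ≤ (data.length : Int) - 6 then pvBFind data j + 6
      else data.length := by
  induction k generalizing j with
  | zero =>
    have h : ¬ (j : Int) ≤ (data.length : Int) - 6 := by omega
    rw [pvAFind, pvBFind, dif_neg h, dif_neg h, if_neg h]
  | succ k ih =>
    by_cases h : (j : Int) ≤ (data.length : Int) - 6
    · rw [pvAFind, pvBFind, dif_pos h, dif_pos h]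
      by_cases hm : PySem.List.slice data (some (j : Int)) (some ((j : Int) + 6)) = pvMsgEnd
      · simp [hm, h]
      · simp only [hm, ne_eq, not_false_eq_true, if_true]
        exact ih (j + 1) (by omega)
    · rw [pvAFind, pvBFind, dif_neg h, dif_neg h, if_neg h]

-- A's outer loop only appends to its accumulator.
theorem pvALoop_acc (k : Nat) (data : List Int) (i : Nat) (r : List Int)
    (hk : data.length - i ≤ k) :
    pvALoop data i r = r ++ pvALoop data i [] := by
  induction k generalizing i r with
  | zero =>
    have hi : ¬ i < data.length := by omega
    rw [pvALoop, dif_neg hi]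
    conv_rhs => rw [pvALoop, dif_neg hi]
    simp
  | succ k ih =>
    by_cases hi : i < data.length
    · by_cases hm : (i : Int) ≤ (data.length : Int) - 6 ∧
          PySem.List.slice data (some (i : Int)) (some ((i : Int) + 6)) = pvMsgStart
      · have h6 := hm.1
        rw [pvALoop, dif_pos hi, dif_pos hm]
        conv_rhs => rw [pvALoop, dif_pos hi, dif_pos hm]
        exact ih (pvAFind data (i + 6)) r (by have := pvAFind_ge data (i + 6) (by omega); omega)
      · rw [pvALoop, dif_pos hi, dif_neg hm]
        conv_rhs => rw [pvALoop, dif_pos hi, dif_neg hm]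
        rw [ih (i + 1) _ (by omega), ih (i + 1) ([] ++ [(PySem.List.pyGet? data (i : Int)).getD 0]) (by omega)]
        simp
    · rw [pvALoop, dif_neg hi]
      conv_rhs => rw [pvALoop, dif_neg hi]
      simp

-- Past the last possible marker position, A just copies the rest of the data.
theorem pvALoop_tail (k : Nat) (data : List Int) (i : Nat)
    (hk : data.length - i ≤ k) (hi : ¬ (i : Int) ≤ (data.length : Int) - 6) :
    pvALoop data i [] = data.drop i := by
  induction k generalizing i with
  | zero =>
    rw [pvALoop]
    have h1 : ¬ i < data.length := by omega
    rw [List.drop_eq_nil_of_le (by omega)]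
    simp [h1]
  | succ k ih =>
    rw [pvALoop]
    by_cases h1 : i < data.length
    · have hm : ¬ ((i : Int) ≤ (data.length : Int) - 6 ∧
          PySem.List.slice data (some (i : Int)) (some ((i : Int) + 6)) = pvMsgStart) := by
        intro hc; exact hi hc.1
      rw [dif_pos h1, dif_neg hm]
      rw [pvALoop_acc k data (i + 1) _ (by omega), ih (i + 1) (by omega) (by omega)]
      rw [List.drop_eq_getElem_cons h1]
      simp [pysem, h1]
    · simp only [h1, dif_neg, not_false_iff]
      rw [List.drop_eq_nil_of_le (by omega)]

-- Assembled output of B's span list.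
def pvAsm (data : List Int) (spans : List (Nat × Nat)) : List Int :=
  spans.flatMap (fun p => (data.drop p.1).take (p.2 - p.1))

theorem pvAsm_append (data : List Int) (spans : List (Nat × Nat)) (p : Nat × Nat) :
    pvAsm data (spans ++ [p]) = pvAsm data spans ++ (data.drop p.1).take (p.2 - p.1) := by
  simp [pvAsm]

-- Main invariant: assembling B's scan result equals the bytes A has already
-- kept in the current gap plus whatever A's loop still produces from i.
theorem pvScan_eq (k : Nat) (data : List Int) (i cursor : Nat) (spans : List (Nat × Nat))
    (hk : data.length - i ≤ k) (hc : cursor ≤ i) (hn : i ≤ data.length) :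
    pvAsm data (pvBScan data i cursor spans) =
      pvAsm data spans ++ (data.drop cursor).take (i - cursor) ++ pvALoop data i [] := by
  induction k generalizing i cursor spans with
  | zero =>
    have hlen : ¬ (i : Int) ≤ (data.length : Int) - 6 := by omega
    rw [pvBScan, dif_neg hlen, pvAsm_append, pvALoop_tail 0 data i (by omega) hlen]
    have h1 : (data.drop cursor).take (data.length - cursor) = data.drop cursor :=
      List.take_of_length_le (by simp)
    have h2 : data.drop i = (data.drop cursor).drop (i - cursor) := by
      rw [List.drop_drop]; congr 1; omega
    rw [h1, h2, List.append_assoc, List.take_append_drop]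
  | succ k ih =>
    by_cases hlen : (i : Int) ≤ (data.length : Int) - 6
    · rw [pvBScan, dif_pos hlen]
      by_cases hm : PySem.List.slice data (some (i : Int)) (some ((i : Int) + 6)) = pvMsgStart
      · rw [if_pos hm]
        have hge := pvBFind_ge data (i + 6)
        set j := pvBFind data (i + 6) with hj
        set i' := if (j : Int) ≤ (data.length : Int) - 6 then j + 6 else data.length with hi'
        have hi'le : i' ≤ data.length := by rw [hi']; split <;> omega
        have hi'gt : i < i' := by rw [hi']; split <;> omega
        rw [ih i' i' _ (by omega) (le_refl i') hi'le, pvAsm_append]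
        have hA : pvALoop data i [] = pvALoop data i' [] := by
          rw [pvALoop, dif_pos (show i < data.length by omega), dif_pos ⟨hlen, hm⟩,
            pvAFind_eq (data.length - (i + 6)) data (i + 6) (by omega), ← hj, ← hi']
        rw [hA]
        simp
      · rw [if_neg hm]
        rw [ih (i + 1) cursor spans (by omega) (by omega) (by omega)]
        have hilt : i < data.length := by omega
        have hA : pvALoop data i [] =
            (PySem.List.pyGet? data (i : Int)).getD 0 :: pvALoop data (i + 1) [] := by
          rw [pvALoop, dif_pos hilt, dif_neg (by intro hc'; exact hm hc'.2),
            pvALoop_acc k data (i + 1) _ (by omega)]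
          simp
        rw [hA]
        have hget : (PySem.List.pyGet? data (i : Int)).getD 0 = data[i] := by
          simp [pysem, hilt]
        have hlt : i - cursor < (data.drop cursor).length := by
          rw [List.length_drop]; omega
        have htake : (data.drop cursor).take (i + 1 - cursor) =
            (data.drop cursor).take (i - cursor) ++ [data[i]] := by
          have he : i + 1 - cursor = (i - cursor) + 1 := by omega
          rw [he, List.take_add_one, List.getElem?_eq_getElem hlt]
          simp only [Option.toList_some]
          congr 2
          rw [List.getElem_drop]
          congr 1; omega
        rw [hget, htake]
        simp
    · rw [pvBScan, dif_neg hlen, pvAsm_append, pvALoop_tail (k + 1) data i hk hlen]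
      have h1 : (data.drop cursor).take (data.length - cursor) = data.drop cursor :=
        List.take_of_length_le (by simp)
      have h2 : data.drop i = (data.drop cursor).drop (i - cursor) := by
        rw [List.drop_drop]; congr 1; omega
      rw [h1, h2, List.append_assoc, List.take_append_drop]

-- ===== VERDICT (by name: the statement is the Claim_ definition above) =====
theorem strip_message_blocks_py_spec : Claim_equal_strip_message_blocks_py := by
  intro data _
  unfold Spec_strip_message_blocks_py strip_message_blocks_py strip_message_blocks_py_alt
  rw [← List.flatMap_eq_foldl]
  have : (pvBScan data 0 0 []).flatMap
      (fun p => PySem.List.slice data (some ((p.1 : Nat) : Int)) (some ((p.2 : Nat) : Int))) =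
      pvAsm data (pvBScan data 0 0 []) := by
    unfold pvAsm
    congr 1
    funext p
    rw [PySem.List.slice_natCast]
  rw [this, pvScan_eq data.length data 0 0 [] (by omega) (by omega) (by omega)]
  simp [pvAsm]
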